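-- pv_equiv track=rewrite | github.com/lachlanchen/Video2Book | scripts/audit_pocket_pdf.py | normalize_excerpt
-- ===== SOURCE A (Python) =====
-- def normalize_excerpt(page_text: str, match_start: int, match_end: int) -> str:
--     lines = page_text.splitlines()
--     offset = 0
--     for idx, line in enumerate(lines):
--         line_end = offset + len(line) + 1
--         if match_start < line_end:
--             excerpt_lines = lines[max(0, idx - 1): min(len(lines), idx + 2)]
--             return "\n".join(excerpt_lines).strip()
--         offset = line_end
--     return page_text[max(0, match_start - 80): match_end + 80].strip()
-- ===== SOURCE B (Python) =====
-- import bisect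
--
-- def normalize_excerpt(page_text: str, match_start: int, match_end: int) -> str:
--     lines = page_text.splitlines()
--     ends = []
--     offset = 0
--     for line in lines:
--         offset += len(line) + 1
--         ends.append(offset)
--     idx = bisect.bisect_right(ends, match_start)
--     if idx < len(lines):
--         return "\n".join(lines[max(0, idx - 1): min(len(lines), idx + 2)]).strip()
--     return page_text[max(0, match_start - 80): match_end + 80].strip()
-- ===== Notes on version B (the rewrite author's own statement) =====
-- stated objective: idiomatic
-- what changed: Replaces A's linear scan with a running offset by building a cumulative line-end offset table once and locating the match line with bisect.bisect_right (binary search).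
import Mathlib
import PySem

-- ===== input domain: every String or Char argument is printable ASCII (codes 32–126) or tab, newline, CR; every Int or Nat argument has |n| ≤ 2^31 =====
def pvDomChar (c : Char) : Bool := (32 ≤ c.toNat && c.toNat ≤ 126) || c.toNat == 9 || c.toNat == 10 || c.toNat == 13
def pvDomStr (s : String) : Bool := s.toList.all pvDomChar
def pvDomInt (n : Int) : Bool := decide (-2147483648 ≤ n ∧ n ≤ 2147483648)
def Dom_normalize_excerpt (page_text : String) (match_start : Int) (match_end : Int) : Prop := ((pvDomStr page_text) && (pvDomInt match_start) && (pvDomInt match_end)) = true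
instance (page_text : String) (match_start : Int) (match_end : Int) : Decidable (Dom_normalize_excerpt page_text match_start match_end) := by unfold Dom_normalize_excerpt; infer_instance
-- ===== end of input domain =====

-- B replaces A's linear locate-scan with a cumulative line-end offset table plus bisect_right (alternative data structure; same result).

-- ===== PORT A =====
-- A's for-loop over enumerate(lines) with running `offset`, early return on `match_start < line_end`.
def nexALoop (page_text : String) (match_start match_end : Int) (lines : List String) :
    List String → Int → Nat → String
  | [], _, _ =>
      PySem.Str.strip (PySem.Str.slice page_text (some (max 0 (match_start - 80))) (some (match_end + 80)))
  | l :: rest, offset, idx =>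
      if match_start < offset + PySem.Str.len l + 1 then
        PySem.Str.strip (PySem.Str.join "\n"
          (PySem.List.slice lines (some (max 0 ((idx : Int) - 1))) (some (min (lines.length : Int) ((idx : Int) + 2)))))
      else nexALoop page_text match_start match_end lines rest (offset + PySem.Str.len l + 1) (idx + 1)

def normalize_excerpt (page_text : String) (match_start : Int) (match_end : Int) : String :=
  let lines := PySem.Str.splitlines page_text
  nexALoop page_text match_start match_end lines lines 0 0

-- ===== PORT B =====
-- B's for-loop building the `ends` table (offset += len(line)+1; ends.append(offset)).
def nexBEnds : List String → Int → List Int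
  | [], _ => []
  | l :: rest, offset =>
      (offset + PySem.Str.len l + 1) :: nexBEnds rest (offset + PySem.Str.len l + 1)

def normalize_excerpt_alt (page_text : String) (match_start : Int) (match_end : Int) : String :=
  let lines := PySem.Str.splitlines page_text
  let ends := nexBEnds lines 0
  let idx := PySem.List.bisectRight ends match_start
  if idx < lines.length then
    PySem.Str.strip (PySem.Str.join "\n"
      (PySem.List.slice lines (some (max 0 ((idx : Int) - 1))) (some (min (lines.length : Int) ((idx : Int) + 2)))))
  else
    PySem.Str.strip (PySem.Str.slice page_text (some (max 0 (match_start - 80))) (some (match_end + 80)))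

-- ===== PRECONDITION & SPEC =====
def Spec_normalize_excerpt (page_text : String) (match_start : Int) (match_end : Int) (out : String) : Prop := out = normalize_excerpt_alt page_text match_start match_end
instance (page_text : String) (match_start : Int) (match_end : Int) (out : String) : Decidable (Spec_normalize_excerpt page_text match_start match_end out) := by unfold Spec_normalize_excerpt; infer_instance

-- ===== CLAIM (what is proved, stated in full; the proofs are below) =====
def Claim_equal_normalize_excerpt : Prop := ∀ (page_text : String) (match_start : Int) (match_end : Int), Dom_normalize_excerpt page_text match_start match_end → Spec_normalize_excerpt page_text match_start match_end (normalize_excerpt page_text match_start match_end)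

-- ===== LEMMAS AND PROOFS =====

theorem nexBEnds_gt (lines : List String) (off : Int) :
    ∀ e ∈ nexBEnds lines off, off < e := by
  induction lines generalizing off with
  | nil => intro e he; simp [nexBEnds] at he
  | cons l rest ih =>
    intro e he
    simp only [nexBEnds, List.mem_cons] at he
    have hlen : (0 : Int) ≤ PySem.Str.len l := by
      rw [PySem.Str.len_eq]; exact_mod_cast Nat.zero_le _
    rcases he with h | h
    · omega
    · have := ih (off + PySem.Str.len l + 1) e h; omega

theorem nexBEnds_pairwise (lines : List String) (off : Int) :
    List.Pairwise (fun a b => a ≤ b) (nexBEnds lines off) := by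
  induction lines generalizing off with
  | nil => simp [nexBEnds]
  | cons l rest ih =>
    simp only [nexBEnds, List.pairwise_cons]
    refine ⟨?_, ih _⟩
    intro e he
    have := nexBEnds_gt rest (off + PySem.Str.len l + 1) e he
    omega

-- bisect_right computes the first index whose entry exceeds the key (= findIdx), given a sorted table.
theorem bisectRight_eq_findIdx (ends : List Int) (x : Int)
    (hs : List.Pairwise (fun a b => a ≤ b) ends) :
    PySem.List.bisectRight ends x = List.findIdx (fun e => decide (x < e)) ends := by
  obtain ⟨hble, hlo, hhi⟩ := PySem.List.bisectRight_spec ends x hs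
  set b := PySem.List.bisectRight ends x with hb
  set f := List.findIdx (fun e => decide (x < e)) ends with hf
  have hfle : f ≤ ends.length := List.findIdx_le_length
  rcases lt_trichotomy b f with h | h | h
  · exfalso
    have hblt : b < ends.length := lt_of_lt_of_le h hfle
    have h1 : x < ends[b] := hhi b hblt le_rfl
    have h2 := List.not_of_lt_findIdx (p := fun e => decide (x < e)) (xs := ends) (i := b) h
    simp at h2
    omega
  · exact h
  · exfalso
    have hflt : f < ends.length := lt_of_lt_of_le h hble
    have h1 : x < ends[f] := by
      have := List.findIdx_getElem (p := fun e => decide (x < e)) (xs := ends) (w := hflt)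
      simpa using this
    have h2 : ends[f] ≤ x := hlo f hflt h
    omega

-- Characterization of A's scan loop in terms of findIdx over the end-offset table of the remaining lines.
theorem nexALoop_eq (page_text : String) (ms me : Int) (lines : List String) :
    ∀ (rem : List String) (off : Int) (idx : Nat),
      nexALoop page_text ms me lines rem off idx =
        (let r := List.findIdx (fun e => decide (ms < e)) (nexBEnds rem off)
         if r < rem.length then
           PySem.Str.strip (PySem.Str.join "\n"
             (PySem.List.slice lines (some (max 0 (((idx + r : Nat) : Int) - 1)))
               (some (min (lines.length : Int) (((idx + r : Nat) : Int) + 2)))))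
         else
           PySem.Str.strip (PySem.Str.slice page_text (some (max 0 (ms - 80))) (some (me + 80)))) := by
  intro rem
  induction rem with
  | nil => intro off idx; simp [nexALoop, nexBEnds]
  | cons l rest ih =>
    intro off idx
    simp only [nexALoop, nexBEnds, List.findIdx_cons]
    by_cases h : ms < off + PySem.Str.len l + 1
    · have hd : (decide (ms < off + PySem.Str.len l + 1)) = true := by simpa using h
      rw [if_pos h]
      simp only [hd, cond_true]
      have h0 : 0 < (l :: rest).length := by simp
      rw [if_pos h0]
      norm_num
    · have hd : (decide (ms < off + PySem.Str.len l + 1)) = false := by simpa using h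
      rw [if_neg h, ih (off + PySem.Str.len l + 1) (idx + 1)]
      simp only [hd, cond_false]
      set r' := List.findIdx (fun e => decide (ms < e)) (nexBEnds rest (off + PySem.Str.len l + 1)) with hr'
      by_cases hc : r' < rest.length
      · have hlt : r' + 1 < (l :: rest).length := by simp; omega
        rw [if_pos hc, if_pos hlt]
        have harith : idx + 1 + r' = idx + (r' + 1) := by omega
        rw [harith]
      · have hge : ¬ (r' + 1 < (l :: rest).length) := by simp; omega
        rw [if_neg hc, if_neg hge]

-- ===== VERDICT (by name: the statement is the Claim_ definition above) =====
theorem normalize_excerpt_spec : Claim_equal_normalize_excerpt := by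
  intro page_text match_start match_end _
  unfold Spec_normalize_excerpt normalize_excerpt normalize_excerpt_alt
  dsimp only
  rw [nexALoop_eq page_text match_start match_end (PySem.Str.splitlines page_text)
        (PySem.Str.splitlines page_text) 0 0]
  rw [bisectRight_eq_findIdx (nexBEnds (PySem.Str.splitlines page_text) 0) match_start
        (nexBEnds_pairwise (PySem.Str.splitlines page_text) 0)]
  simp only [Nat.zero_add]
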